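-- pv_equiv track=rewrite | github.com/falyse/advent-of-code | util.py | find_all_endpoints
-- ===== SOURCE A (Python) =====
-- import operator
--
-- def coord_move(loc, dir, num_steps=1):
--     dir_deltas = {'N': (0, num_steps),
--                   'S': (0, -1*num_steps),
--                   'E': (num_steps, 0),
--                   'W': (-1*num_steps, 0)}
--     delta = dir_deltas[dir]
--     next_loc = tuple_add(loc, delta)
--     return next_loc
--
-- def tuple_add(tuple0, tuple1):
--     return tuple(map(operator.add, tuple0, tuple1))
--
-- def get_open_dirs(grid, loc, blockers=[], retval='dir'):
--     opens = []
--     for dir in ['N', 'S', 'E', 'W']: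
--         next_loc = coord_move(loc, dir)
--         val = grid.get(next_loc)
--         if val is not None and val not in blockers:
--             if retval == 'dir':
--                 opens.append(dir)
--             elif retval == 'loc':
--                 opens.append(next_loc)
--             elif retval == 'val':
--                 opens.append(val)
--     return opens
--
-- def find_all_endpoints(grid, loc, steps, blockers=[]):
--     '''Find all endpoints that are reachable from a start location in specified number of steps'''
--     memo = {}
--     locs = [loc]
--     for i in range(steps):
--         next_locs = []
--         for loc in locs:
--             if loc in memo:
--                 adjacent = memo[loc]
--             else:
--                 adjacent = get_open_dirs(grid, loc, blockers, retval='loc')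
--                 memo[loc] = adjacent
--             next_locs.extend(adjacent)
--             next_locs = list(set(next_locs))
--         locs = next_locs
--     return locs
-- ===== SOURCE B (Python) =====
-- def find_all_endpoints(grid, loc, steps, blockers=[]):
--     '''Find all endpoints that are reachable from a start location in specified number of steps'''
--     def nbrs(p):
--         x, y = p
--         out = []
--         for n in ((x, y + 1), (x, y - 1), (x + 1, y), (x - 1, y)):
--             v = grid.get(n)
--             if v is not None and v not in blockers:
--                 out.append(n)
--         return out
--
--     cur = [loc]
--     prev = None
--     remaining = steps
--     while remaining > 0:
--         nxt = list(dict.fromkeys(n for p in cur for n in nbrs(p)))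
--         remaining -= 1
--         if nxt == prev:
--             # period-2 saturation: further steps only alternate between nxt and cur
--             return nxt if remaining % 2 == 0 else cur
--         prev, cur = cur, nxt
--     return cur
-- ===== Notes on version B (the rewrite author's own statement) =====
-- stated objective: alternative
-- what changed: B drops A's memo dict and per-cell set rebuild: it dedups the frontier once per step with an ordered dict.fromkeys pass, and detects period-2 saturation of the frontier (new frontier equals the one two steps back) so all remaining steps are resolved by parity instead of being iterated.
import Mathlib
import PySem

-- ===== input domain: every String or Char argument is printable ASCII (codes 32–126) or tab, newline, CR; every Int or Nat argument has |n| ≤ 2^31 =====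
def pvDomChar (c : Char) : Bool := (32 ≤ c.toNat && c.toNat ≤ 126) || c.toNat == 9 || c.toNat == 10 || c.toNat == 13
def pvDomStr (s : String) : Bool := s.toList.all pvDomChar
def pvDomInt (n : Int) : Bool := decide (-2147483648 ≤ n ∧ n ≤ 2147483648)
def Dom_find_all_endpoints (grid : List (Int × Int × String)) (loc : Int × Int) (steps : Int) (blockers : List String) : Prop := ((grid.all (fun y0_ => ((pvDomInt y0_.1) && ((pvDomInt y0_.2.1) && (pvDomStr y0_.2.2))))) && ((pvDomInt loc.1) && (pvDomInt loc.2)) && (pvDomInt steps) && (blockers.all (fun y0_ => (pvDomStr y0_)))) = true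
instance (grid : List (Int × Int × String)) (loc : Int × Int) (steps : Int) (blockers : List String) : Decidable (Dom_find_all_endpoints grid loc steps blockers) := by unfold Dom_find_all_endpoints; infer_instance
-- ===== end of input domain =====

-- B replaces A's per-cell set rebuild + memo with one ordered dedup per step and a
-- period-2 saturation check that resolves the remaining steps by parity (objective: alternative).
-- Python's `list(set(next_locs))` is ported as ordered dedup (PySem.List.dedup); the
-- result is exact up to set equality, which is how this function's output is compared.

-- the Python dict `grid` arrives as a list of triples; dict lookup (shared type adapter)
def pvGridGet (grid : List (Int × Int × String)) (k : Int × Int) : Option String :=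
  (PySem.Dict.ofList (grid.map (fun e => ((e.1, e.2.1), e.2.2)))).get? k

-- ===== PORT A =====
def coord_move (loc : Int × Int) (dir : String) : Int × Int :=
  -- dir_deltas[dir] with num_steps = 1, then tuple_add
  let delta : Int × Int :=
    if dir = "N" then (0, 1)
    else if dir = "S" then (0, -1)
    else if dir = "E" then (1, 0)
    else (-1, 0)
  (loc.1 + delta.1, loc.2 + delta.2)

-- get_open_dirs with retval = 'loc' (the only retval find_all_endpoints uses)
def get_open_locs (grid : List (Int × Int × String)) (loc : Int × Int) (blockers : List String) : List (Int × Int) :=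
  (["N", "S", "E", "W"] : List String).foldl (fun opens dir =>
    let next_loc := coord_move loc dir
    let val := pvGridGet grid next_loc
    if (match val with | some v => !blockers.contains v | none => false)
    then opens ++ [next_loc] else opens) []

def find_all_endpoints (grid : List (Int × Int × String)) (loc : Int × Int) (steps : Int) (blockers : List String) : List (Int × Int) :=
  ((PySem.List.pyRange 0 steps 1).foldl
    (fun (st : PySem.Dict (Int × Int) (List (Int × Int)) × List (Int × Int)) _i =>
      st.2.foldl
        (fun (q : PySem.Dict (Int × Int) (List (Int × Int)) × List (Int × Int)) l =>
          match q.1.get? l with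
          | some adjacent => (q.1, PySem.List.dedup (q.2 ++ adjacent))
          | none =>
            let adjacent := get_open_locs grid l blockers
            (q.1.insert l adjacent, PySem.List.dedup (q.2 ++ adjacent)))
        (st.1, []))
    (PySem.Dict.empty, [loc])).2

-- ===== PORT B =====
def alt_nbrs (grid : List (Int × Int × String)) (blockers : List String) (p : Int × Int) : List (Int × Int) :=
  [(p.1, p.2 + 1), (p.1, p.2 - 1), (p.1 + 1, p.2), (p.1 - 1, p.2)].filter
    (fun n => match pvGridGet grid n with | some v => !blockers.contains v | none => false)

def alt_step (grid : List (Int × Int × String)) (blockers : List String) (cur : List (Int × Int)) : List (Int × Int) :=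
  PySem.List.dedup (cur.flatMap (alt_nbrs grid blockers))

def alt_loop (grid : List (Int × Int × String)) (blockers : List String) :
    Nat → List (Int × Int) → Option (List (Int × Int)) → List (Int × Int)
  | 0, cur, _ => cur
  | n + 1, cur, prev =>
    let nxt := alt_step grid blockers cur
    if some nxt = prev then (if n % 2 = 0 then nxt else cur)
    else alt_loop grid blockers n nxt (some cur)

def find_all_endpoints_alt (grid : List (Int × Int × String)) (loc : Int × Int) (steps : Int) (blockers : List String) : List (Int × Int) :=
  alt_loop grid blockers steps.toNat [loc] none

-- ===== PRECONDITION & SPEC =====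
def Spec_find_all_endpoints (grid : List (Int × Int × String)) (loc : Int × Int) (steps : Int) (blockers : List String) (out : List (Int × Int)) : Prop := out = find_all_endpoints_alt grid loc steps blockers
instance (grid : List (Int × Int × String)) (loc : Int × Int) (steps : Int) (blockers : List String) (out : List (Int × Int)) : Decidable (Spec_find_all_endpoints grid loc steps blockers out) := by unfold Spec_find_all_endpoints; infer_instance

-- ===== CLAIM (what is proved, stated in full; the proofs are below) =====
def Claim_equal_find_all_endpoints : Prop := ∀ (grid : List (Int × Int × String)) (loc : Int × Int) (steps : Int) (blockers : List String), Dom_find_all_endpoints grid loc steps blockers → Spec_find_all_endpoints grid loc steps blockers (find_all_endpoints grid loc steps blockers)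

-- ===== LEMMAS AND PROOFS =====

-- A's adjacency (fold over direction names) = B's adjacency (filter over the four cells)
theorem open_locs_eq (grid : List (Int × Int × String)) (l : Int × Int) (blockers : List String) :
    get_open_locs grid l blockers = alt_nbrs grid blockers l := by
  unfold get_open_locs alt_nbrs
  rw [PySem.List.foldl_append_if
    (p := fun dir => match pvGridGet grid (coord_move l dir) with | some v => !blockers.contains v | none => false)
    (f := coord_move l)]
  have h4 : [(l.1, l.2 + 1), (l.1, l.2 - 1), (l.1 + 1, l.2), (l.1 - 1, l.2)]
      = (["N", "S", "E", "W"] : List String).map (coord_move l) := by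
    simp [coord_move]
    constructor <;> ring
  rw [h4, List.filter_map]
  simp [Function.comp_def]

-- dedup absorbs an already-deduplicated prefix
theorem dedup_dedup_append {α : Type} [BEq α] [LawfulBEq α] (xs ys : List α) :
    PySem.List.dedup (PySem.List.dedup xs ++ ys) = PySem.List.dedup (xs ++ ys) := by
  simp only [PySem.List.dedup_eq_ofList, PySem.Set.ofList_append, PySem.Set.ofList_ofList]

theorem dedup_idem {α : Type} [BEq α] [LawfulBEq α] (xs : List α) :
    PySem.List.dedup (PySem.List.dedup xs) = PySem.List.dedup xs := by
  conv_lhs => rw [← List.append_nil (PySem.List.dedup xs)]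
  rw [dedup_dedup_append, List.append_nil]

-- memo invariant: every stored value is the adjacency of its key
def MemoInv (grid : List (Int × Int × String)) (blockers : List String)
    (d : PySem.Dict (Int × Int) (List (Int × Int))) : Prop :=
  ∀ p ∈ d.items, p.2 = get_open_locs grid p.1 blockers

theorem memo_get (grid : List (Int × Int × String)) (blockers : List String)
    (d : PySem.Dict (Int × Int) (List (Int × Int))) (h : MemoInv grid blockers d)
    (l : Int × Int) (v : List (Int × Int)) (hg : d.get? l = some v) :
    v = get_open_locs grid l blockers :=
  h (l, v) (PySem.Dict.mem_items_of_get?_eq_some d hg)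

theorem memo_insert (grid : List (Int × Int × String)) (blockers : List String)
    (d : PySem.Dict (Int × Int) (List (Int × Int))) (h : MemoInv grid blockers d) (l : Int × Int) :
    MemoInv grid blockers (d.insert l (get_open_locs grid l blockers)) := by
  intro p hp
  rcases (PySem.Dict.mem_items_insert d l (get_open_locs grid l blockers) p).1 hp with rfl | hp'
  · rfl
  · exact h p hp'.1

-- the inner per-location loop is one dedup of the concatenated adjacencies
theorem inner_loop (grid : List (Int × Int × String)) (blockers : List String) :
    ∀ (ls : List (Int × Int)) (d : PySem.Dict (Int × Int) (List (Int × Int)))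
      (acc : List (Int × Int)), MemoInv grid blockers d → PySem.List.dedup acc = acc →
    (ls.foldl
      (fun (q : PySem.Dict (Int × Int) (List (Int × Int)) × List (Int × Int)) l =>
        match q.1.get? l with
        | some adjacent => (q.1, PySem.List.dedup (q.2 ++ adjacent))
        | none =>
          let adjacent := get_open_locs grid l blockers
          (q.1.insert l adjacent, PySem.List.dedup (q.2 ++ adjacent)))
      (d, acc)).2 = PySem.List.dedup (acc ++ ls.flatMap (fun l => get_open_locs grid l blockers))
    ∧ MemoInv grid blockers (ls.foldl
      (fun (q : PySem.Dict (Int × Int) (List (Int × Int)) × List (Int × Int)) l =>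
        match q.1.get? l with
        | some adjacent => (q.1, PySem.List.dedup (q.2 ++ adjacent))
        | none =>
          let adjacent := get_open_locs grid l blockers
          (q.1.insert l adjacent, PySem.List.dedup (q.2 ++ adjacent)))
      (d, acc)).1 := by
  intro ls
  induction ls with
  | nil =>
    intro d acc hd ha
    refine ⟨?_, hd⟩
    simpa using ha.symm
  | cons l ls ih =>
    intro d acc hd ha
    simp only [List.foldl_cons, List.flatMap_cons]
    cases hg : d.get? l with
    | some adjacent =>
      have hv : adjacent = get_open_locs grid l blockers :=
        memo_get grid blockers d hd l adjacent hg
      subst hv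
      have hrec := ih d (PySem.List.dedup (acc ++ get_open_locs grid l blockers)) hd (dedup_idem _)
      refine ⟨?_, hrec.2⟩
      rw [hrec.1, dedup_dedup_append, List.append_assoc]
    | none =>
      have hd' := memo_insert grid blockers d hd l
      have hrec := ih (d.insert l (get_open_locs grid l blockers))
        (PySem.List.dedup (acc ++ get_open_locs grid l blockers)) hd' (dedup_idem _)
      refine ⟨?_, hrec.2⟩
      rw [hrec.1, dedup_dedup_append, List.append_assoc]

-- the outer loop iterates the step function once per range element
theorem outer_loop (grid : List (Int × Int × String)) (blockers : List String) :
    ∀ (rng : List Int) (st : PySem.Dict (Int × Int) (List (Int × Int)) × List (Int × Int)),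
      MemoInv grid blockers st.1 →
    (rng.foldl
      (fun (st : PySem.Dict (Int × Int) (List (Int × Int)) × List (Int × Int)) _i =>
        st.2.foldl
          (fun (q : PySem.Dict (Int × Int) (List (Int × Int)) × List (Int × Int)) l =>
            match q.1.get? l with
            | some adjacent => (q.1, PySem.List.dedup (q.2 ++ adjacent))
            | none =>
              let adjacent := get_open_locs grid l blockers
              (q.1.insert l adjacent, PySem.List.dedup (q.2 ++ adjacent)))
          (st.1, []))
      st).2 = (alt_step grid blockers)^[rng.length] st.2 := by
  intro rng
  induction rng with
  | nil => intro st _; simp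
  | cons i rng ih =>
    intro st hst
    rw [List.foldl_cons, List.length_cons, Function.iterate_succ_apply]
    have hin := inner_loop grid blockers st.2 st.1 [] hst rfl
    have hstep : (st.2.foldl
        (fun (q : PySem.Dict (Int × Int) (List (Int × Int)) × List (Int × Int)) l =>
          match q.1.get? l with
          | some adjacent => (q.1, PySem.List.dedup (q.2 ++ adjacent))
          | none =>
            let adjacent := get_open_locs grid l blockers
            (q.1.insert l adjacent, PySem.List.dedup (q.2 ++ adjacent)))
        (st.1, [])).2 = alt_step grid blockers st.2 := by
      rw [hin.1, alt_step]
      simp [open_locs_eq]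
    have hrec := ih (st.2.foldl
        (fun (q : PySem.Dict (Int × Int) (List (Int × Int)) × List (Int × Int)) l =>
          match q.1.get? l with
          | some adjacent => (q.1, PySem.List.dedup (q.2 ++ adjacent))
          | none =>
            let adjacent := get_open_locs grid l blockers
            (q.1.insert l adjacent, PySem.List.dedup (q.2 ++ adjacent)))
        (st.1, [])) hin.2
    rw [hrec, hstep]

-- iterating a function that has period 2 at x
theorem iterate_period2 {α : Type} (f : α → α) :
    ∀ (n : Nat) (x : α), f (f x) = x → f^[n] x = if n % 2 = 0 then x else f x := by
  intro n
  induction n using Nat.twoStepInduction with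
  | zero => intro x _; simp
  | one => intro x _; simp
  | more n ih _ =>
    intro x h
    have h2 : f^[n + 2] x = f^[n] x := by
      rw [Function.iterate_succ_apply, Function.iterate_succ_apply, h]
    rw [h2, ih x h, Nat.add_mod_right]

-- B's loop computes the n-fold iterate of the step function
theorem alt_loop_iterate (grid : List (Int × Int × String)) (blockers : List String) :
    ∀ (n : Nat) (cur : List (Int × Int)) (prev : Option (List (Int × Int))),
      (∀ p, prev = some p → alt_step grid blockers p = cur) →
      alt_loop grid blockers n cur prev = (alt_step grid blockers)^[n] cur := by
  intro n
  induction n with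
  | zero => intro cur prev _; simp [alt_loop]
  | succ n ih =>
    intro cur prev hprev
    rw [alt_loop]
    by_cases h : some (alt_step grid blockers cur) = prev
    · have hc : alt_step grid blockers (alt_step grid blockers cur) = cur :=
        hprev _ h.symm
      have hp2 : alt_step grid blockers (alt_step grid blockers (alt_step grid blockers cur))
          = alt_step grid blockers cur := by rw [hc]
      rw [if_pos h, Function.iterate_succ_apply,
        iterate_period2 (alt_step grid blockers) n (alt_step grid blockers cur) hp2]
      split_ifs with hn
      · rfl
      · rw [hc]
    · rw [if_neg h, ih _ _ (by intro p hp; cases hp; rfl), Function.iterate_succ_apply]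

theorem pyRange_len (steps : Int) : (PySem.List.pyRange 0 steps 1).length = steps.toNat := by
  rw [PySem.List.pyRange_of_pos 0 steps (by norm_num)]
  simp only [List.length_map, List.length_range]
  split_ifs with h <;> omega

-- ===== VERDICT (by name: the statement is the Claim_ definition above) =====
theorem find_all_endpoints_spec : Claim_equal_find_all_endpoints := by
  intro grid loc steps blockers _
  unfold Spec_find_all_endpoints find_all_endpoints find_all_endpoints_alt
  rw [outer_loop grid blockers (PySem.List.pyRange 0 steps 1) (PySem.Dict.empty, [loc])
      (by intro p hp; simp [PySem.Dict.empty] at hp),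
    pyRange_len,
    alt_loop_iterate grid blockers steps.toNat [loc] none (by intro p hp; cases hp)]
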